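-- pv_equiv track=rewrite | github.com/Enjef/Algo | 2400 - 2499/2406 - Divide Intervals Into Minimum Number of Groups/2406 - Divide Intervals Into Minimum Number of Groups.py | minGroups_best_speed
-- ===== SOURCE A (Python) =====
-- from typing import List
--
-- def minGroups_best_speed(intervals: List[List[int]]) -> int:
--     start, end = [], []
--     for interval in intervals:
--         start.append(interval[0])
--         end.append(interval[1])
--     start = sorted(start)
--     end = sorted(end)
--     mg, i, j = 1, 1, 0
--     while i < len(start):
--         if end[j] >= start[i]:
--             mg += 1
--             i += 1
--         else:
--             i += 1
--             j += 1
--     return mg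
-- ===== SOURCE B (Python) =====
-- from typing import List
--
-- def minGroups_best_speed(intervals: List[List[int]]) -> int:
--     # minimum groups = max overlap = max over sorted starts of
--     # (rank+1) - (number of ends strictly before that start), found by binary search
--     starts = sorted(iv[0] for iv in intervals)
--     ends = sorted(iv[1] for iv in intervals)
--     best = 1
--     for i, s in enumerate(starts):
--         lo, hi = 0, len(ends)
--         while lo < hi:
--             mid = (lo + hi) // 2
--             if ends[mid] < s:
--                 lo = mid + 1
--             else:
--                 hi = mid
--         cand = i + 1 - lo
--         if cand > best:
--             best = cand
--     return best
-- ===== Notes on version B (the rewrite author's own statement) =====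
-- stated objective: alternative
-- what changed: Replaces A's merged two-pointer walk over the sorted start/end arrays by a direct maximisation: for each start, its rank plus one minus the number of ends strictly before it (found by hand-written binary search), taking the running maximum.
import Mathlib
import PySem

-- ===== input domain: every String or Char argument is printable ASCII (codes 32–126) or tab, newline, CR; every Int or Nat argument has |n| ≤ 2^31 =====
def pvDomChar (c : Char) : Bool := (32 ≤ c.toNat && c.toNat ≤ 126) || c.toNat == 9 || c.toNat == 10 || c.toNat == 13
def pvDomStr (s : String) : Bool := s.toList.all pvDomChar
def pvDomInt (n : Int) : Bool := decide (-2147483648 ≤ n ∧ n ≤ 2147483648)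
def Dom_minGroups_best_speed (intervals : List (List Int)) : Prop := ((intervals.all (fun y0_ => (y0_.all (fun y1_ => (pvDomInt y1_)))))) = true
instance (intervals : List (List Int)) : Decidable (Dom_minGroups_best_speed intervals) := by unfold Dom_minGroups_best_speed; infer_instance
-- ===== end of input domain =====

-- B replaces the two-pointer sweep by a per-start binary-search maximisation (same O(n log n) cost, different algorithm).

-- ===== PORT A =====
-- the while-loop of A: state (mg, i, j), loop while i < len(start); fuel = len(start) bounds the iteration count
def minGroupsLoopA (startl endl : List Int) : Nat → Int → Nat → Nat → Int
  | 0, mg, _, _ => mg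
  | fuel + 1, mg, i, j =>
    if i < startl.length then
      if PySem.List.pyGetD endl (j : Int) 0 ≥ PySem.List.pyGetD startl (i : Int) 0 then
        minGroupsLoopA startl endl fuel (mg + 1) (i + 1) j
      else
        minGroupsLoopA startl endl fuel mg (i + 1) (j + 1)
    else mg

def minGroups_best_speed (intervals : List (List Int)) : Int :=
  let se := intervals.foldl
    (fun (p : List Int × List Int) interval =>
      (p.1 ++ [PySem.List.pyGetD interval 0 0], p.2 ++ [PySem.List.pyGetD interval 1 0]))
    ([], [])
  let start := PySem.List.sorted se.1 (fun x => x) false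
  let «end» := PySem.List.sorted se.2 (fun x => x) false
  minGroupsLoopA start «end» start.length 1 1 0

-- ===== PORT B =====
-- hand-written bisect_left loop of Source B; fuel = len(ends) bounds the iteration count (hi - lo shrinks each step)
def bisectLoopB (ends : List Int) (s : Int) : Nat → Nat → Nat → Nat
  | 0, lo, _ => lo
  | fuel + 1, lo, hi =>
    if lo < hi then
      let mid := (lo + hi) / 2
      if PySem.List.pyGetD ends (mid : Int) 0 < s then bisectLoopB ends s fuel (mid + 1) hi
      else bisectLoopB ends s fuel lo mid
    else lo

def minGroups_best_speed_alt (intervals : List (List Int)) : Int :=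
  let starts := PySem.List.sorted (intervals.map (fun iv => PySem.List.pyGetD iv 0 0)) (fun x => x) false
  let ends := PySem.List.sorted (intervals.map (fun iv => PySem.List.pyGetD iv 1 0)) (fun x => x) false
  (PySem.List.enumerate starts 0).foldl
    (fun best p =>
      let lo := bisectLoopB ends p.2 ends.length 0 ends.length
      let cand := p.1 + 1 - (lo : Int)
      if cand > best then cand else best) 1

-- ===== PRECONDITION & SPEC =====
-- Pre_ excludes exactly the inputs on which Python A raises IndexError: an interval with fewer than two elements.
def Pre_minGroups_best_speed (intervals : List (List Int)) : Prop :=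
  ∀ iv ∈ intervals, 2 ≤ iv.length
instance (intervals : List (List Int)) : Decidable (Pre_minGroups_best_speed intervals) := by
  unfold Pre_minGroups_best_speed; infer_instance

def pvWitness_minGroups_best_speed : List (List Int) := [[1, 3], [2, 4], [5, 6]]

def Spec_minGroups_best_speed (intervals : List (List Int)) (out : Int) : Prop := out = minGroups_best_speed_alt intervals
instance (intervals : List (List Int)) (out : Int) : Decidable (Spec_minGroups_best_speed intervals out) := by unfold Spec_minGroups_best_speed; infer_instance

-- ===== CLAIM (what is proved, stated in full; the proofs are below) =====
def Claim_equal_minGroups_best_speed : Prop := ∀ (intervals : List (List Int)), Dom_minGroups_best_speed intervals → Pre_minGroups_best_speed intervals → Spec_minGroups_best_speed intervals (minGroups_best_speed intervals)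

-- ===== LEMMAS AND PROOFS =====

theorem getD_mono (e : List Int) (he : e.Pairwise (· ≤ ·)) (p q : Nat) (hpq : p ≤ q)
    (hq : q < e.length) : e.getD p 0 ≤ e.getD q 0 := by
  rcases eq_or_lt_of_le hpq with rfl | h
  · exact le_refl _
  · rw [List.getD_eq_getElem e 0 (lt_of_le_of_lt hpq hq), List.getD_eq_getElem e 0 hq]
    exact (List.pairwise_iff_getElem.mp he) p q _ _ h

theorem bisect_spec (e : List Int) (x : Int) (he : e.Pairwise (· ≤ ·)) :
    ∀ (d lo hi : Nat), hi - lo ≤ d → lo ≤ hi → hi ≤ e.length →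
    (∀ k, k < lo → e.getD k 0 < x) →
    (∀ k, hi ≤ k → k < e.length → ¬ e.getD k 0 < x) →
    bisectLoopB e x d lo hi ≤ e.length ∧
    (∀ k, k < bisectLoopB e x d lo hi → e.getD k 0 < x) ∧
    (∀ k, bisectLoopB e x d lo hi ≤ k → k < e.length → ¬ e.getD k 0 < x) := by
  intro d
  induction d with
  | zero =>
    intro lo hi hd hlh hhl hlow hup
    have : lo = hi := by omega
    subst this
    exact ⟨le_trans hlh hhl, hlow, hup⟩
  | succ d ih =>
    intro lo hi hd hlh hhl hlow hup
    rw [bisectLoopB]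
    by_cases h : lo < hi
    · simp only [h, if_true]
      have hmid1 : lo ≤ (lo + hi) / 2 := by omega
      have hmid2 : (lo + hi) / 2 < hi := by omega
      have hmlen : (lo + hi) / 2 < e.length := by omega
      rw [PySem.List.pyGetD_natCast]
      by_cases hc : e.getD ((lo + hi) / 2) 0 < x
      · simp only [hc, if_true]
        exact ih ((lo + hi) / 2 + 1) hi (by omega) (by omega) hhl
          (fun k hk => lt_of_le_of_lt (getD_mono e he k ((lo+hi)/2) (by omega) hmlen) hc)
          hup
      · simp only [hc, if_false]
        exact ih lo ((lo + hi) / 2) (by omega) (by omega) (by omega) hlow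
          (fun k hk hklen hlt => hc (lt_of_le_of_lt (getD_mono e he ((lo+hi)/2) k hk hklen) hlt))
    · simp only [h, if_false]
      have : lo = hi := by omega
      subst this
      exact ⟨le_trans hlh hhl, hlow, hup⟩

def ptE (e : List Int) (x : Int) : Nat := bisectLoopB e x e.length 0 e.length

theorem ptE_spec (e : List Int) (x : Int) (he : e.Pairwise (· ≤ ·)) :
    ptE e x ≤ e.length ∧ (∀ k, k < ptE e x → e.getD k 0 < x) ∧
    (∀ k, ptE e x ≤ k → k < e.length → ¬ e.getD k 0 < x) :=
  bisect_spec e x he e.length 0 e.length (by omega) (by omega) le_rfl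
    (fun k hk => absurd hk (Nat.not_lt_zero k)) (fun k hk hklen => absurd hklen (by omega))

theorem ptE_iff (e : List Int) (x : Int) (he : e.Pairwise (· ≤ ·)) (j : Nat) (hj : j < e.length) :
    x ≤ e.getD j 0 ↔ ptE e x ≤ j := by
  obtain ⟨h1, h2, h3⟩ := ptE_spec e x he
  constructor
  · intro hx
    by_contra hlt
    exact absurd hx (not_le.mpr (h2 j (by omega)))
  · intro hle
    exact not_lt.mp (h3 j hle hj)

theorem ptE_mono (e : List Int) (x y : Int) (he : e.Pairwise (· ≤ ·)) (hxy : x ≤ y) :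
    ptE e x ≤ ptE e y := by
  obtain ⟨hx1, hx2, hx3⟩ := ptE_spec e x he
  obtain ⟨hy1, hy2, hy3⟩ := ptE_spec e y he
  by_contra h
  rw [not_le] at h
  exact hy3 (ptE e y) le_rfl (by omega) (lt_of_lt_of_le (hx2 (ptE e y) h) hxy)

theorem loopA_eq (s e : List Int) (hlen : e.length = s.length)
    (hs : s.Pairwise (· ≤ ·)) (he : e.Pairwise (· ≤ ·)) :
    ∀ (d i : Nat) (mg : Int), s.length ≤ i + d → 1 ≤ i → 1 ≤ mg → mg ≤ (i : Int) →
    ((i : Int)) - (ptE e (s.getD (i - 1) 0) : Int) ≤ mg →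
    minGroupsLoopA s e d mg i (i - mg.toNat) =
      (PySem.List.enumerate (s.drop i) (i : Int)).foldl
        (fun best p =>
          let lo := bisectLoopB e p.2 e.length 0 e.length
          let cand := p.1 + 1 - (lo : Int)
          if cand > best then cand else best) mg := by
  intro d
  induction d with
  | zero =>
    intro i mg hd _ _ _ _
    rw [minGroupsLoopA]
    simp [List.drop_eq_nil_of_le (by omega : s.length ≤ i)]
  | succ d ih =>
    intro i mg hd hi1 hmg1 hmgi hprev
    by_cases hi : i < s.length
    case neg =>
      rw [minGroupsLoopA]
      simp [List.drop_eq_nil_of_le (by omega : s.length ≤ i), hi]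
    case pos =>
    have hmgt : 1 ≤ mg.toNat := by omega
    have hmgti : mg.toNat ≤ i := by omega
    have hj : i - mg.toNat < e.length := by omega
    have hcastj : ((i - mg.toNat : Nat) : Int) = (i : Int) - mg := by omega
    rw [minGroupsLoopA]
    simp only [hi, if_true, PySem.List.pyGetD_natCast, ge_iff_le]
    rw [List.drop_eq_getElem_cons hi, PySem.List.enumerate_cons, List.foldl_cons]
    have hsi : s[i] = s.getD i 0 := (List.getD_eq_getElem s 0 hi).symm
    have hLlen : ptE e (s.getD i 0) ≤ e.length := (ptE_spec e _ he).1
    have hfle : (i : Int) + 1 - (ptE e (s.getD i 0) : Int) ≤ mg + 1 := by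
      have hmono := ptE_mono e (s.getD (i - 1) 0) (s.getD i 0) he
        (getD_mono s hs (i - 1) i (by omega) hi)
      omega
    have hpt : bisectLoopB e (s.getD i 0) e.length 0 e.length = ptE e (s.getD i 0) := rfl
    by_cases hc : s.getD i 0 ≤ e.getD (i - mg.toNat) 0
    · simp only [hc, if_true]
      have hL : ptE e (s.getD i 0) ≤ i - mg.toNat := (ptE_iff e _ he _ hj).mp hc
      have hj' : i - mg.toNat = (i + 1) - (mg + 1).toNat := by omega
      rw [hj']
      rw [ih (i + 1) (mg + 1) (by omega) (by omega) (by omega) (by push_cast; omega)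
        (by simp only [Nat.add_sub_cancel]; omega)]
      congr 1
      simp only [hsi, hpt]
      rw [if_pos (by omega)]
      omega
    · simp only [hc, if_false]
      have hL : ¬ ptE e (s.getD i 0) ≤ i - mg.toNat := fun h => hc ((ptE_iff e _ he _ hj).mpr h)
      have hj' : i - mg.toNat + 1 = (i + 1) - mg.toNat := by omega
      rw [hj']
      rw [ih (i + 1) mg (by omega) (by omega) (by omega) (by push_cast; omega)
        (by simp only [Nat.add_sub_cancel]; omega)]
      congr 1
      simp only [hsi, hpt]
      rw [if_neg (by omega)]

theorem foldl_build (l : List (List Int)) : ∀ (a b : List Int),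
    l.foldl (fun (p : List Int × List Int) interval =>
      (p.1 ++ [PySem.List.pyGetD interval 0 0], p.2 ++ [PySem.List.pyGetD interval 1 0])) (a, b)
    = (a ++ l.map (fun iv => PySem.List.pyGetD iv 0 0), b ++ l.map (fun iv => PySem.List.pyGetD iv 1 0)) := by
  induction l with
  | nil => intro a b; simp
  | cons x t ih => intro a b; simp [ih]

theorem final (intervals : List (List Int)) :
    (let se := intervals.foldl
      (fun (p : List Int × List Int) interval =>
        (p.1 ++ [PySem.List.pyGetD interval 0 0], p.2 ++ [PySem.List.pyGetD interval 1 0]))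
      ([], [])
     let start := PySem.List.sorted se.1 (fun x => x) false
     let «end» := PySem.List.sorted se.2 (fun x => x) false
     minGroupsLoopA start «end» start.length 1 1 0) =
    (let starts := PySem.List.sorted (intervals.map (fun iv => PySem.List.pyGetD iv 0 0)) (fun x => x) false
     let ends := PySem.List.sorted (intervals.map (fun iv => PySem.List.pyGetD iv 1 0)) (fun x => x) false
     (PySem.List.enumerate starts 0).foldl
      (fun best p =>
        let lo := bisectLoopB ends p.2 ends.length 0 ends.length
        let cand := p.1 + 1 - (lo : Int)
        if cand > best then cand else best) 1) := by
  rw [foldl_build]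
  simp only [List.nil_append]
  set s := PySem.List.sorted (intervals.map (fun iv => PySem.List.pyGetD iv 0 0)) (fun x => x) false with hsdef
  set e := PySem.List.sorted (intervals.map (fun iv => PySem.List.pyGetD iv 1 0)) (fun x => x) false with hedef
  have hs : s.Pairwise (· ≤ ·) := by
    have := PySem.List.sorted_pairwise (xs := intervals.map (fun iv => PySem.List.pyGetD iv 0 0)) (key := fun x => x)
    simpa [hsdef] using this
  have he : e.Pairwise (· ≤ ·) := by
    have := PySem.List.sorted_pairwise (xs := intervals.map (fun iv => PySem.List.pyGetD iv 1 0)) (key := fun x => x)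
    simpa [hedef] using this
  have hlen : e.length = s.length := by
    simp [hsdef, hedef, PySem.List.length_sorted]
  by_cases hn : s.length = 0
  · have hsnil : s = [] := List.eq_nil_of_length_eq_zero hn
    simp [hsnil, minGroupsLoopA]
  · have h1 : 1 ≤ s.length := by omega
    have := loopA_eq s e hlen hs he s.length 1 1 (by omega) le_rfl le_rfl (by norm_num)
      (by have : (0:Int) ≤ (ptE e (s.getD 0 0) : Int) := by positivity
          omega)
    simp only [Int.toNat_one, Nat.sub_self] at this
    rw [this]
    have h0 : 0 < s.length := by omega
    have hpeel : s = s[0] :: s.drop 1 := by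
      conv_lhs => rw [← List.drop_zero (l := s), List.drop_eq_getElem_cons h0]
    conv_rhs => rw [hpeel]
    rw [PySem.List.enumerate_cons, List.foldl_cons]
    have hL0 : (0:Int) ≤ (bisectLoopB e s[0] e.length 0 e.length : Int) := by positivity
    norm_num
    rw [if_neg (by omega)]

-- ===== VERDICT (by name: the statement is the Claim_ definition above) =====
theorem minGroups_best_speed_spec : Claim_equal_minGroups_best_speed := by
  intro intervals _ _
  unfold Spec_minGroups_best_speed minGroups_best_speed minGroups_best_speed_alt
  exact final intervals
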